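-- pv_equiv track=rewrite | github.com/Liem-Ngo/shiny-triz | docs/triz_39_45/convert_csv_2_json.py | create_json_matrix
-- ===== SOURCE A (Python) =====
-- def create_json_matrix(csv_matrix):
--     """
--     Transform the CSV matrix into the JSON format.
--     Based on analysis, two operations are needed:
--     1. Transpose the matrix (swap rows and columns)
--     2. For each row r in the transposed matrix, apply a circular shift to the right by (r+1) positions
--     """
--     rows = len(csv_matrix)
--     cols = max(len(row) for row in csv_matrix)
--
--     # Step 1: Create a transposed matrix
--     transposed = []
--     for c in range(cols):
--         new_row = []
--         for r in range(rows):
--             if c < len(csv_matrix[r]):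
--                 new_row.append(csv_matrix[r][c])
--             else:
--                 new_row.append([])  # Handle missing values at the end of rows
--         transposed.append(new_row)
--
--     # Step 2: Apply a circular shift to each row in the transposed matrix
--     json_matrix = []
--     for r in range(len(transposed)):
--         shifted_row = [[] for _ in range(len(transposed[r]))]
--         for c in range(len(transposed[r])):
--             new_c = (c + r + 1) % len(transposed[r])
--             shifted_row[new_c] = transposed[r][c]
--         json_matrix.append(shifted_row)
--
--     return json_matrix
-- ===== SOURCE B (Python) =====
-- def create_json_matrix(csv_matrix):
--     """
--     Transform the CSV matrix into the JSON format.
--     Gather formulation: output cell (c, j) is pulled directly from source row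
--     (j - c - 1) % rows, fusing the transpose and the circular right shift by
--     (c + 1) into a single direct-indexing comprehension (no intermediate
--     transposed matrix, no scatter into a placeholder row).
--     """
--     rows = len(csv_matrix)
--     cols = max(len(row) for row in csv_matrix)
--
--     def cell(r, c):
--         row = csv_matrix[r]
--         return row[c] if c < len(row) else []
--
--     return [[cell((j - c - 1) % rows, c) for j in range(rows)]
--             for c in range(cols)]
-- ===== Notes on version B (the rewrite author's own statement) =====
-- stated objective: alternative
-- what changed: A builds an intermediate transposed matrix and then scatters each row into a placeholder list via modular index assignment; B fuses both steps into one gather comprehension that pulls output cell (c, j) directly from source row (j - c - 1) % rows, with no intermediate matrix and no scatter.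
import Mathlib
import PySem

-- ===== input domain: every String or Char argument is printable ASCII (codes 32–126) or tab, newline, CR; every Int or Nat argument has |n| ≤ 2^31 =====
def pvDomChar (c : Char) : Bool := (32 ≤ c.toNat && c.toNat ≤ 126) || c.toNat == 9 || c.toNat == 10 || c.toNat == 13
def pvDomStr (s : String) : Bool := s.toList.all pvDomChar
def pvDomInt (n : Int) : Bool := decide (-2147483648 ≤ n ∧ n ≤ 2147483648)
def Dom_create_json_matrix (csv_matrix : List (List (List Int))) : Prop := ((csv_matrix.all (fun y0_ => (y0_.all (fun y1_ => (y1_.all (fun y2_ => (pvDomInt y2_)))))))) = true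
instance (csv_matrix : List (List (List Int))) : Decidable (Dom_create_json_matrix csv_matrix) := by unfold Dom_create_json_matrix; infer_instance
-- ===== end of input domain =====

-- B fuses A's transpose + scatter-shift into one gather comprehension (output cell (c,j) pulled
-- directly from source row (j-c-1) % rows); same cost, different decomposition (objective: alternative).

-- ===== PORT A =====
def create_json_matrix (csv_matrix : List (List (List Int))) : List (List (List Int)) :=
  let rows : Int := (csv_matrix.length : Int)
  let cols : Int := (PySem.List.max? (csv_matrix.map (fun row => (row.length : Int))) (fun x => x)).getD 0
  -- Step 1: transposed matrix, built row by row with appends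
  let transposed : List (List (List Int)) :=
    (PySem.List.pyRange 0 cols 1).foldl (fun transposed c =>
      transposed ++ [(PySem.List.pyRange 0 rows 1).foldl (fun new_row r =>
        let row := PySem.List.pyGetD csv_matrix r []
        new_row ++ [if c < (row.length : Int) then PySem.List.pyGetD row c [] else []]) []]) []
  -- Step 2: circular right shift of each transposed row, scattered into a placeholder row
  (PySem.List.pyRange 0 (transposed.length : Int) 1).foldl (fun json_matrix r =>
    let trow := PySem.List.pyGetD transposed r []
    let shifted_row := (PySem.List.pyRange 0 (trow.length : Int) 1).map (fun _ => ([] : List Int))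
    let shifted_row := (PySem.List.pyRange 0 (trow.length : Int) 1).foldl (fun sr c =>
      PySem.List.pySetD sr (PySem.Int.mod (c + r + 1) (trow.length : Int)) (PySem.List.pyGetD trow c [])) shifted_row
    json_matrix ++ [shifted_row]) []

-- ===== PORT B =====
def create_json_matrix_alt (csv_matrix : List (List (List Int))) : List (List (List Int)) :=
  let rows : Int := (csv_matrix.length : Int)
  let cols : Int := (PySem.List.max? (csv_matrix.map (fun row => (row.length : Int))) (fun x => x)).getD 0
  let cell : Int → Int → List Int := fun r c =>
    let row := PySem.List.pyGetD csv_matrix r []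
    if c < (row.length : Int) then PySem.List.pyGetD row c [] else []
  (PySem.List.pyRange 0 cols 1).map (fun c =>
    (PySem.List.pyRange 0 rows 1).map (fun j =>
      cell (PySem.Int.mod (j - c - 1) rows) c))

-- ===== PRECONDITION & SPEC =====
-- Pre_ excludes only the empty matrix, on which both Pythons raise ValueError (max() of an empty sequence).
def Pre_create_json_matrix (csv_matrix : List (List (List Int))) : Prop := csv_matrix ≠ []
instance (csv_matrix : List (List (List Int))) : Decidable (Pre_create_json_matrix csv_matrix) := by unfold Pre_create_json_matrix; infer_instance
def pvWitness_create_json_matrix : List (List (List Int)) := [[[1], [2]], [[3]]]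

def Spec_create_json_matrix (csv_matrix : List (List (List Int))) (out : List (List (List Int))) : Prop := out = create_json_matrix_alt csv_matrix
instance (csv_matrix : List (List (List Int))) (out : List (List (List Int))) : Decidable (Spec_create_json_matrix csv_matrix out) := by unfold Spec_create_json_matrix; infer_instance

-- ===== CLAIM (what is proved, stated in full; the proofs are below) =====
def Claim_equal_create_json_matrix : Prop := ∀ (csv_matrix : List (List (List Int))), Dom_create_json_matrix csv_matrix → Pre_create_json_matrix csv_matrix → Spec_create_json_matrix csv_matrix (create_json_matrix csv_matrix)

-- ===== LEMMAS AND PROOFS =====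

-- the guarded cell access both ports perform (csv_matrix[r][c] if c < len(csv_matrix[r]) else [])
def pvCell (m : List (List (List Int))) (r c : Int) : List Int :=
  let row := PySem.List.pyGetD m r []
  if c < (row.length : Int) then PySem.List.pyGetD row c [] else []

theorem pvFoldlSetLength {α : Type} (L : List Nat) (f : Nat → Nat) (g : Nat → α)
    (init : List α) :
    (L.foldl (fun acc c => acc.set (f c) (g c)) init).length = init.length := by
  induction L generalizing init with
  | nil => rfl
  | cons c L ih => simp [List.foldl_cons, ih, List.length_set]

theorem pvFoldlSetNoWrite {α : Type} (L : List Nat) (f : Nat → Nat) (g : Nat → α)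
    (init : List α) (j : Nat) (h : ∀ c ∈ L, f c ≠ j) :
    (L.foldl (fun acc c => acc.set (f c) (g c)) init)[j]? = init[j]? := by
  induction L generalizing init with
  | nil => rfl
  | cons c L ih =>
    rw [List.foldl_cons, ih _ (fun c' hc' => h c' (List.mem_cons_of_mem _ hc')),
        List.getElem?_set_ne (h c (List.mem_cons_self))]

theorem pvFoldlSetOneWrite {α : Type} (L : List Nat) (f : Nat → Nat) (g : Nat → α)
    (init : List α) (j c₀ : Nat) (hnd : L.Nodup) (hmem : c₀ ∈ L) (hf : f c₀ = j)
    (hj : j < init.length) (huniq : ∀ c ∈ L, f c = j → c = c₀) :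
    (L.foldl (fun acc c => acc.set (f c) (g c)) init)[j]? = some (g c₀) := by
  induction L generalizing init with
  | nil => cases hmem
  | cons c L ih =>
    rw [List.foldl_cons]
    rcases List.mem_cons.mp hmem with rfl | hc₀L
    · rw [pvFoldlSetNoWrite _ _ _ _ j ?_, hf, List.getElem?_set_self hj]
      intro c' hc' hfc'
      have hcc : c' = c₀ := huniq c' (List.mem_cons_of_mem _ hc') hfc'
      subst hcc
      exact absurd hc' (List.nodup_cons.mp hnd).1
    · have hne : f c ≠ j := by
        intro h
        have hcc : c = c₀ := huniq c List.mem_cons_self h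
        subst hcc
        exact (List.nodup_cons.mp hnd).1 hc₀L
      apply ih _ (List.nodup_cons.mp hnd).2 hc₀L
        (by simpa [List.length_set] using hj)
        (fun c' hc' h' => huniq c' (List.mem_cons_of_mem _ hc') h')

-- the scatter 'shifted_row[(c+k) % n] = g c' loop equals the gather 'g ((j-k) mod n)' map
theorem pvScatterEq (g : Nat → List Int) (n k : Nat) (hn : 0 < n)
    (init : List (List Int)) (hlen : init.length = n) :
    (List.range n).foldl (fun sr c => sr.set ((c + k) % n) (g c)) init
    = (List.range n).map (fun (j : Nat) => g ((((j : Int) - (k : Int)) % (n : Int)).toNat)) := by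
  have hnz : (n : Int) ≠ 0 := by exact_mod_cast hn.ne'
  have hnpos : (0 : Int) < (n : Int) := by exact_mod_cast hn
  apply List.ext_getElem?
  intro j
  by_cases hj : j < n
  · have hc0nonneg : 0 ≤ ((j : Int) - k) % (n : Int) := Int.emod_nonneg _ hnz
    set c₀ := (((j : Int) - k) % (n : Int)).toNat with hc₀def
    have hcast : ((c₀ : Nat) : Int) = ((j : Int) - k) % (n : Int) := by
      rw [hc₀def, Int.toNat_of_nonneg hc0nonneg]
    have hc0lt : c₀ < n := by
      have := Int.emod_lt_of_pos ((j : Int) - k) hnpos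
      omega
    have hfc0 : (c₀ + k) % n = j := by
      have h1 : (((c₀ + k) % n : Nat) : Int) = (j : Int) := by
        push_cast
        rw [hcast, Int.emod_add_emod, Int.sub_add_cancel,
            Int.emod_eq_of_lt (by positivity) (by exact_mod_cast hj)]
      exact_mod_cast h1
    have huniq : ∀ c ∈ List.range n, (c + k) % n = j → c = c₀ := by
      intro c hc hcj
      have hcn := List.mem_range.mp hc
      have h2 : (c + k) % n = (c₀ + k) % n := by rw [hcj, hfc0]
      have h3 : c % n = c₀ % n := Nat.ModEq.add_right_cancel' k h2
      rwa [Nat.mod_eq_of_lt hcn, Nat.mod_eq_of_lt hc0lt] at h3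
    have hmain := pvFoldlSetOneWrite (List.range n) (fun c => (c + k) % n) g
      init j c₀ List.nodup_range
      (List.mem_range.mpr hc0lt) hfc0 (by rw [hlen]; exact hj) huniq
    rw [hmain, List.getElem?_map, List.getElem?_range hj]
    rfl
  · rw [List.getElem?_eq_none, List.getElem?_eq_none]
    · simpa using le_of_not_gt hj
    · rw [pvFoldlSetLength, hlen]
      exact le_of_not_gt hj

-- the common gather normal form both ports are reduced to
def pvGather (m : List (List (List Int))) (ncols : Nat) : List (List (List Int)) :=
  (List.range ncols).map (fun (c : Nat) =>
    (List.range m.length).map (fun (j : Nat) =>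
      pvCell m (((j : Int) - (c : Int) - 1) % (m.length : Int)) (c : Int)))

theorem pvAltEq (m : List (List (List Int))) (ncols : Nat) (hn : 0 < m.length)
    (hcols : (PySem.List.max? (m.map (fun row => (row.length : Int))) (fun x => x)).getD 0 = (ncols : Int)) :
    create_json_matrix_alt m = pvGather m ncols := by
  unfold create_json_matrix_alt pvGather
  rw [hcols]
  dsimp only []
  rw [PySem.List.pyRange_zero_natCast, PySem.List.pyRange_zero_natCast]
  simp only [List.map_map]
  refine List.map_congr_left (fun c _ => ?_)
  refine List.map_congr_left (fun j _ => ?_)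
  simp only [Function.comp]
  rw [PySem.Int.mod_eq_emod_of_pos (by exact_mod_cast hn)]
  simp [pvCell]

theorem pvAEq (m : List (List (List Int))) (ncols : Nat) (hn : 0 < m.length)
    (hcols : (PySem.List.max? (m.map (fun row => (row.length : Int))) (fun x => x)).getD 0 = (ncols : Int)) :
    create_json_matrix m = pvGather m ncols := by
  unfold create_json_matrix pvGather
  rw [hcols]
  dsimp only []
  simp only [PySem.List.foldl_append_singleton_eq_map, List.nil_append]
  simp only [List.length_map, PySem.List.length_pyRange_one, sub_zero, Int.toNat_natCast]
  simp only [PySem.List.pyRange_zero_natCast, List.map_map, List.foldl_map,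
    PySem.List.pyGetD_natCast]
  refine List.map_congr_left (fun c hc => ?_)
  have hcn : c < ncols := List.mem_range.mp hc
  dsimp only [Function.comp]
  simp only [PySem.List.pyGetD_natCast, List.getD_eq_getElem?_getD, List.getElem?_map,
    List.getElem?_range, hcn, Option.map_some, Option.getD_some]
  simp only [Function.comp_apply, List.length_map, List.length_range, List.getElem?_map]
  refine Eq.trans (PySem.List.foldl_congr_mem (List.range m.length) _
    (fun sr cc => sr.set ((cc + (c + 1)) % m.length) (pvCell m (cc : Int) (c : Int))) _ ?_) ?_
  · intro sr cc hcc
    have hccn : cc < m.length := List.mem_range.mp hcc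
    have hx : ((cc : Int) + (c : Int) + 1) = ((cc + (c + 1) : Nat) : Int) := by push_cast; ring
    rw [hx, PySem.Int.mod_natCast, PySem.List.pySetD_natCast]
    simp [pvCell, PySem.List.pyGetD_natCast, hccn]
  · rw [pvScatterEq (fun cc => pvCell m (cc : Int) (c : Int)) m.length (c + 1) hn _ (by simp)]
    refine List.map_congr_left (fun j hj => ?_)
    have hnn : 0 ≤ ((j : Int) - ((c + 1 : Nat) : Int)) % (m.length : Int) :=
      Int.emod_nonneg _ (by exact_mod_cast hn.ne')
    have hx2 : ((j : Int) - ((c + 1 : Nat) : Int)) % (m.length : Int)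
        = ((j : Int) - (c : Int) - 1) % (m.length : Int) := by push_cast; ring_nf
    rw [Int.toNat_of_nonneg hnn, hx2]

-- ===== VERDICT (by name: the statement is the Claim_ definition above) =====
theorem create_json_matrix_spec : Claim_equal_create_json_matrix := by
  intro m _ hpre
  unfold Pre_create_json_matrix at hpre
  unfold Spec_create_json_matrix
  have hn : 0 < m.length := List.length_pos_iff.mpr hpre
  cases h : PySem.List.max? (m.map (fun row => (row.length : Int))) (fun x => x) with
  | none =>
    exact absurd (by simpa using (PySem.List.max?_eq_none_iff _ _).mp h) hpre
  | some v =>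
    obtain ⟨row, _, hrow⟩ := List.mem_map.mp (PySem.List.max?_mem h)
    have hv0 : 0 ≤ v := by rw [← hrow]; exact Int.natCast_nonneg _
    have hcols : (PySem.List.max? (m.map (fun row => (row.length : Int))) (fun x => x)).getD 0 = ((v.toNat : Nat) : Int) := by
      rw [h, Option.getD_some, Int.toNat_of_nonneg hv0]
    rw [pvAEq m v.toNat hn hcols, pvAltEq m v.toNat hn hcols]
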